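-- pv_equiv track=rewrite | github.com/Guanghan/lighttrack | utils/utils_io_file.py | count_lead_and_trail_zeroes
-- ===== SOURCE A (Python) =====
-- def count_lead_and_trail_zeroes(d):
--     # https://graphics.stanford.edu/~seander/bithacks.html#ZerosOnRightLinear
--     if d:
--         v = (d ^ (d - 1) >> 1)  # Set v's trailing 0s to 1s and zero rest
--         trailing = 0
--         while v:
--             v >>= 1
--             trailing += 1
--
--         leading = 64
--         v = d
--         while v:
--             v >>= 1
--             leading -= 1
--         return leading, trailing
--     return 64, 64
-- ===== SOURCE B (Python) =====
-- def count_lead_and_trail_zeroes(d):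
--     if d:
--         return 64 - d.bit_length(), (d ^ (d - 1) >> 1).bit_length()
--     return 64, 64
-- ===== Notes on version B (the rewrite author's own statement) =====
-- stated objective: idiomatic
-- what changed: Both per-bit shift-counting while-loops are replaced by closed-form int.bit_length() queries (leading = 64 - d.bit_length(), trailing = bit_length of the trailing-ones mask).
-- outside the precondition, e.g. on count_lead_and_trail_zeroes(-1): A does not finish within the time limit, B returns (63, 0)
import Mathlib
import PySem

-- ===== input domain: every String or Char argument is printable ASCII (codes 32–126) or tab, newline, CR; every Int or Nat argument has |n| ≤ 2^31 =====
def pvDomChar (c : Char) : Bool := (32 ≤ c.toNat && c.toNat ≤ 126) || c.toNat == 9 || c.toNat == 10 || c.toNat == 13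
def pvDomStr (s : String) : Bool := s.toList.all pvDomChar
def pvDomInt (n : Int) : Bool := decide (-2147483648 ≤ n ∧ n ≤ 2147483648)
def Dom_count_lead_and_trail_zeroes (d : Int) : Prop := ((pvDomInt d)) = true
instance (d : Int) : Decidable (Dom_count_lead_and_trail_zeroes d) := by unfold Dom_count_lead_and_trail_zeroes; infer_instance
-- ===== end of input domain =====

-- B replaces A's two per-bit shift-counting while-loops by closed-form bit_length queries (idiomatic);
-- equal wherever A terminates (A loops forever on d < 0, excluded by Pre_).

-- ===== PORT A =====
-- termination helper for the two while-loops (v >>= 1 strictly shrinks a positive v)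
theorem pvShiftToNatLt (v : Int) (h : 0 < v) : (v >>> (1 : Nat)).toNat < v.toNat := by
  rw [Int.shiftRight_eq_div_pow]; omega

-- while v: v >>= 1; trailing += 1   (guard 0 < v only for totality: Python never leaves the loop when v < 0)
def trailLoop (v acc : Int) : Int :=
  if _h1 : v ≠ 0 then
    if h2 : 0 < v then trailLoop (v >>> (1 : Nat)) (acc + 1)
    else acc
  else acc
termination_by v.toNat
decreasing_by exact pvShiftToNatLt v h2

-- while v: v >>= 1; leading -= 1   (same totality guard)
def leadLoop (v acc : Int) : Int :=
  if _h1 : v ≠ 0 then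
    if h2 : 0 < v then leadLoop (v >>> (1 : Nat)) (acc - 1)
    else acc
  else acc
termination_by v.toNat
decreasing_by exact pvShiftToNatLt v h2

def count_lead_and_trail_zeroes (d : Int) : Int × Int :=
  if d ≠ 0 then
    let v := PySem.Int.bxor d ((d - 1) >>> (1 : Nat))  -- d ^ ((d - 1) >> 1)
    let trailing := trailLoop v 0
    let leading := leadLoop d 64
    (leading, trailing)
  else (64, 64)

-- ===== PORT B =====
def count_lead_and_trail_zeroes_alt (d : Int) : Int × Int :=
  if d ≠ 0 then
    (64 - (PySem.Int.bitLength d : Int),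
     (PySem.Int.bitLength (PySem.Int.bxor d ((d - 1) >>> (1 : Nat))) : Int))
  else (64, 64)

-- ===== PRECONDITION & SPEC =====
-- Pre_ excludes d < 0, on which A's while-loops never terminate (v >>= 1 stays -1 forever).
def Pre_count_lead_and_trail_zeroes (d : Int) : Prop := 0 ≤ d
instance (d : Int) : Decidable (Pre_count_lead_and_trail_zeroes d) := by unfold Pre_count_lead_and_trail_zeroes; infer_instance
def pvWitness_count_lead_and_trail_zeroes : Int := 12

def Spec_count_lead_and_trail_zeroes (d : Int) (out : Int × Int) : Prop := out = count_lead_and_trail_zeroes_alt d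
instance (d : Int) (out : Int × Int) : Decidable (Spec_count_lead_and_trail_zeroes d out) := by unfold Spec_count_lead_and_trail_zeroes; infer_instance

-- ===== CLAIM (what is proved, stated in full; the proofs are below) =====
def Claim_equal_count_lead_and_trail_zeroes : Prop := ∀ (d : Int), Dom_count_lead_and_trail_zeroes d → Pre_count_lead_and_trail_zeroes d → Spec_count_lead_and_trail_zeroes d (count_lead_and_trail_zeroes d)

-- ===== LEMMAS AND PROOFS =====
theorem trailLoop_nat (n : Nat) : ∀ acc : Int, trailLoop (n : Int) acc = acc + (PySem.Int.bitLength (n : Int) : Int) := by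
  induction n using Nat.strong_induction_on with
  | _ n ih =>
    intro acc
    rcases Nat.eq_zero_or_pos n with h | h
    · subst h; rw [trailLoop.eq_def]; simp
    · rw [trailLoop.eq_def]
      have hpos : (0 : Int) < (n : Int) := by exact_mod_cast h
      rw [dif_pos (show (n : Int) ≠ 0 by exact_mod_cast h.ne'), dif_pos hpos]
      have hsh : ((n : Int) >>> (1 : Nat)) = ((n / 2 : Nat) : Int) := by
        rw [Int.shiftRight_eq_div_pow]; omega
      rw [hsh, ih (n / 2) (Nat.div_lt_self h (by norm_num)), PySem.Int.bitLength_natCast h]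
      push_cast; ring

theorem leadLoop_nat (n : Nat) : ∀ acc : Int, leadLoop (n : Int) acc = acc - (PySem.Int.bitLength (n : Int) : Int) := by
  induction n using Nat.strong_induction_on with
  | _ n ih =>
    intro acc
    rcases Nat.eq_zero_or_pos n with h | h
    · subst h; rw [leadLoop.eq_def]; simp
    · rw [leadLoop.eq_def]
      have hpos : (0 : Int) < (n : Int) := by exact_mod_cast h
      rw [dif_pos (show (n : Int) ≠ 0 by exact_mod_cast h.ne'), dif_pos hpos]
      have hsh : ((n : Int) >>> (1 : Nat)) = ((n / 2 : Nat) : Int) := by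
        rw [Int.shiftRight_eq_div_pow]; omega
      rw [hsh, ih (n / 2) (Nat.div_lt_self h (by norm_num)), PySem.Int.bitLength_natCast h]
      push_cast; ring

theorem trailLoop_eq (v : Int) (h : 0 ≤ v) (acc : Int) : trailLoop v acc = acc + (PySem.Int.bitLength v : Int) := by
  have : v = (v.toNat : Int) := (Int.toNat_of_nonneg h).symm
  rw [this, trailLoop_nat]

theorem leadLoop_eq (v : Int) (h : 0 ≤ v) (acc : Int) : leadLoop v acc = acc - (PySem.Int.bitLength v : Int) := by
  have : v = (v.toNat : Int) := (Int.toNat_of_nonneg h).symm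
  rw [this, leadLoop_nat]

-- ===== VERDICT (by name: the statement is the Claim_ definition above) =====
theorem count_lead_and_trail_zeroes_spec : Claim_equal_count_lead_and_trail_zeroes := by
  intro d _ hpre
  unfold Spec_count_lead_and_trail_zeroes count_lead_and_trail_zeroes count_lead_and_trail_zeroes_alt
  by_cases hd : d = 0
  · simp [hd]
  · have hdpos : 0 < d := lt_of_le_of_ne hpre (Ne.symm hd)
    have hsh0 : 0 ≤ ((d - 1) >>> (1 : Nat)) := by rw [Int.shiftRight_eq_div_pow]; omega
    have hv0 : 0 ≤ PySem.Int.bxor d ((d - 1) >>> (1 : Nat)) := by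
      rw [PySem.Int.bxor_of_nonneg hpre hsh0]; exact Int.natCast_nonneg _
    simp only [if_pos (by exact hd : d ≠ 0)]
    rw [trailLoop_eq _ hv0, leadLoop_eq _ hpre]
    simp
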